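-- pv_equiv track=rewrite | github.com/wilmurillo-ai/Design-Assistant | .skills/openclaw-skills/skills/penghang1223/oc-context-optimizer/scripts/auto_compactor.py | _group_messages_by_round
-- ===== SOURCE A (Python) =====
-- from typing import List, Dict, Any, Optional, Tuple
--
-- def _group_messages_by_round(messages: List[Dict[str, Any]]) -> List[List[Dict[str, Any]]]:
--     """按API轮次分组消息"""
--     groups = []
--     current_group = []
--
--     for msg in messages:
--         role = msg.get("role", "")
--
--         if role == "assistant":
--             # 助手消息开始新的一轮
--             if current_group:
--                 groups.append(current_group)
--             current_group = [msg]
--         else: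
--             current_group.append(msg)
--
--     if current_group:
--         groups.append(current_group)
--
--     return groups
-- ===== SOURCE B (Python) =====
-- def _group_messages_by_round(messages):
--     """按API轮次分组消息 — recursive span decomposition instead of an accumulating loop"""
--     if not messages:
--         return []
--     group = [messages[0]]
--     rest = messages[1:]
--     while rest and rest[0].get("role", "") != "assistant":
--         group.append(rest[0])
--         rest = rest[1:]
--     return [group] + _group_messages_by_round(rest)
-- ===== Notes on version B (the rewrite author's own statement) =====
-- stated objective: alternative
-- what changed: Replaces A's single accumulating loop with flush-on-assistant state by a recursive decomposition: peel off the first message plus its span of following non-assistant messages as one round, then recurse on the remainder.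
import Mathlib
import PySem

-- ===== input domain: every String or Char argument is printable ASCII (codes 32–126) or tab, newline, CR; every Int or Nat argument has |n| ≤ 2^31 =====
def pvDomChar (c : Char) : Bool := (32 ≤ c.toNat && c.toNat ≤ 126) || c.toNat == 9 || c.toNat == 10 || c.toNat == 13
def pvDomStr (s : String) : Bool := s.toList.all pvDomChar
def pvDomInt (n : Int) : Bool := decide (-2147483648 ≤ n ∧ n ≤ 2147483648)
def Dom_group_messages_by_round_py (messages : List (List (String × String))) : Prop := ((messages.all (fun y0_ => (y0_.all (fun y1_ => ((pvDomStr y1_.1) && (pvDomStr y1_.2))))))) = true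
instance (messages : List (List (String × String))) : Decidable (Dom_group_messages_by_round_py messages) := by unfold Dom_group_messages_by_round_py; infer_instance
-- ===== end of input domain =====

-- B replaces A's accumulating loop (flush current group at each assistant message) by a
-- recursive decomposition: peel off the first message plus its span of following
-- non-assistant messages as one round, then recurse; same values, same cost (alternative).


-- ===== PORT A =====
-- msg.get("role", ""): first-match association-list lookup with default "" (exact dict semantics)
def pvGetRole (msg : List (String × String)) : String :=
  (((msg.find? (fun kv => kv.1 == "role")).map (·.2)).getD "")

def group_messages_by_round_py (messages : List (List (String × String))) : List (List (List (String × String))) :=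
  let st := messages.foldl
    (fun (st : List (List (List (String × String))) × List (List (String × String))) msg =>
      let role := pvGetRole msg
      if role == "assistant" then
        ((if st.2 ≠ [] then st.1 ++ [st.2] else st.1), [msg])
      else
        (st.1, st.2 ++ [msg]))
    ([], [])
  if st.2 ≠ [] then st.1 ++ [st.2] else st.1

-- ===== PORT B =====
-- the while loop of Source B: extend `group` with leading non-assistant messages of `rest`
def pvSpanLoop (group : List (List (String × String))) (rest : List (List (String × String))) :
    List (List (String × String)) × List (List (String × String)) :=
  match rest with
  | [] => (group, [])
  | m :: rest' =>
    if pvGetRole m == "assistant" then (group, m :: rest')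
    else pvSpanLoop (group ++ [m]) rest'

theorem pvSpanLoop_len (group rest : List (List (String × String))) :
    (pvSpanLoop group rest).2.length ≤ rest.length := by
  induction rest generalizing group with
  | nil => simp [pvSpanLoop]
  | cons m rest' ih =>
    simp only [pvSpanLoop]
    split
    · simp
    · exact le_trans (ih (group ++ [m])) (by simp)

def group_messages_by_round_py_alt (messages : List (List (String × String))) : List (List (List (String × String))) :=
  match messages with
  | [] => []
  | m :: rest =>
    let gr := pvSpanLoop [m] rest
    gr.1 :: group_messages_by_round_py_alt gr.2
termination_by messages.length
decreasing_by
  exact Nat.lt_succ_of_le (pvSpanLoop_len [m] rest)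

-- ===== PRECONDITION & SPEC =====
def Spec_group_messages_by_round_py (messages : List (List (String × String))) (out : List (List (List (String × String)))) : Prop := out = group_messages_by_round_py_alt messages
instance (messages : List (List (String × String))) (out : List (List (List (String × String)))) : Decidable (Spec_group_messages_by_round_py messages out) := by unfold Spec_group_messages_by_round_py; infer_instance

-- ===== CLAIM (what is proved, stated in full; the proofs are below) =====
def Claim_equal_group_messages_by_round_py : Prop := ∀ (messages : List (List (String × String))), Dom_group_messages_by_round_py messages → Spec_group_messages_by_round_py messages (group_messages_by_round_py messages)

-- ===== LEMMAS AND PROOFS =====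

theorem alt_cons (m : List (String × String)) (rest : List (List (String × String))) :
    group_messages_by_round_py_alt (m :: rest) =
      (pvSpanLoop [m] rest).1 :: group_messages_by_round_py_alt (pvSpanLoop [m] rest).2 := by
  conv_lhs => rw [group_messages_by_round_py_alt.eq_def]

-- A's loop body, named for the proofs
def pvStep (st : List (List (List (String × String))) × List (List (String × String)))
    (msg : List (String × String)) :
    List (List (List (String × String))) × List (List (String × String)) :=
  if pvGetRole msg == "assistant" then
    ((if st.2 ≠ [] then st.1 ++ [st.2] else st.1), [msg])
  else
    (st.1, st.2 ++ [msg])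

theorem pvFold_glue (ms : List (List (String × String)))
    (g : List (List (List (String × String)))) (c : List (List (String × String))) (hc : c ≠ []) :
    (let st := ms.foldl pvStep (g, c)
     if st.2 ≠ [] then st.1 ++ [st.2] else st.1) =
    g ++ ((pvSpanLoop c ms).1 :: group_messages_by_round_py_alt (pvSpanLoop c ms).2) := by
  induction ms generalizing g c with
  | nil => simp [pvSpanLoop, group_messages_by_round_py_alt.eq_def, hc]
  | cons m rest ih =>
    simp only [List.foldl_cons, pvSpanLoop]
    by_cases hA : pvGetRole m == "assistant"
    · simp only [hA, if_pos, pvStep, hc, ne_eq, not_false_iff]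
      have := ih (g := g ++ [c]) (c := [m]) (by simp)
      simp only [this]
      rw [alt_cons]
      simp [List.append_assoc]
    · simp only [pvStep, hA, if_neg, Bool.not_eq_true] at *
      have := ih (g := g) (c := c ++ [m]) (by simp)
      simpa [hA] using this

-- ===== VERDICT (by name: the statement is the Claim_ definition above) =====
theorem group_messages_by_round_py_spec : Claim_equal_group_messages_by_round_py := by
  intro messages _
  unfold Spec_group_messages_by_round_py
  cases messages with
  | nil => simp [group_messages_by_round_py, group_messages_by_round_py_alt.eq_def]
  | cons m rest =>
    have hstep : pvStep ([], []) m = ([], [m]) := by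
      unfold pvStep; split <;> simp
    have h := pvFold_glue rest ([] : List (List (List (String × String)))) [m] (by simp)
    show (let st := (m :: rest).foldl pvStep ([], [])
          if st.2 ≠ [] then st.1 ++ [st.2] else st.1) = _
    rw [List.foldl_cons, hstep, h, alt_cons]
    simp
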